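-- pv_equiv track=rewrite | github.com/pypi-data/pypi-mirror-59 | packages/SpitzerSec/SpitzerSec-0.1.tar.gz/SpitzerSec-0.1/Spitzer/result/export_table.py | _get_ports
-- ===== SOURCE A (Python) =====
-- def _get_ports(hosts):
--     result = []
--     for _, ports in hosts.items():
--         for port in ports:
--             if port not in result:
--                 result.append(port)
--
--     result.sort()
--     return result
-- ===== SOURCE B (Python) =====
-- def _get_ports(hosts):
--     flat = []
--     for ports in hosts.values():
--         flat.extend(ports)
--     flat.sort()
--     result = []
--     for port in flat:
--         if not result or result[-1] != port:
--             result.append(port)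
--     return result
-- ===== Notes on version B (the rewrite author's own statement) =====
-- stated objective: faster
-- what changed: A dedups with a quadratic membership scan over the growing result list and sorts afterwards; B flattens all ports into one list, sorts it once, then removes adjacent duplicates in a single pass.
import Mathlib
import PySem

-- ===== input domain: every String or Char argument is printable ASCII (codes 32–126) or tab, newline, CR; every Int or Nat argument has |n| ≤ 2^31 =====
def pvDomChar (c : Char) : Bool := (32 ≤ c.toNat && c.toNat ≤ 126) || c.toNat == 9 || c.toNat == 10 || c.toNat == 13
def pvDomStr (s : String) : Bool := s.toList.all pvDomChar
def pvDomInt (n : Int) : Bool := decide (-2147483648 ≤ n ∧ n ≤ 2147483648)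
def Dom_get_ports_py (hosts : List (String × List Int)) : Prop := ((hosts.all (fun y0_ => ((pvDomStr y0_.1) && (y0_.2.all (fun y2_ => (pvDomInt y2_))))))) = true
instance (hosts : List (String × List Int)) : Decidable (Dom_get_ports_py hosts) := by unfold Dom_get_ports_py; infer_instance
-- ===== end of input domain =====

-- B flattens all port lists, sorts once, and removes adjacent duplicates in one pass,
-- replacing A's quadratic membership-scan dedup followed by a sort.


-- ===== PORT A =====
def get_ports_py (hosts : List (String × List Int)) : List Int :=
  let result := hosts.foldl (fun result kv =>
    kv.2.foldl (fun result port =>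
      if port ∈ result then result else result ++ [port]) result) []
  PySem.List.sorted result (fun x => x) false

-- ===== PORT B =====
-- result[-1] on a nonempty list is its last element (getLast?); the emptiness guard is Python's short-circuit 'or'.
def get_ports_py_alt (hosts : List (String × List Int)) : List Int :=
  let flat := hosts.foldl (fun flat kv => flat ++ kv.2) []
  let flat := PySem.List.sorted flat (fun x => x) false
  flat.foldl (fun result port =>
    if result = [] ∨ result.getLast? ≠ some port then result ++ [port] else result) []

-- ===== PRECONDITION & SPEC =====
def Spec_get_ports_py (hosts : List (String × List Int)) (out : List Int) : Prop := out = get_ports_py_alt hosts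
instance (hosts : List (String × List Int)) (out : List Int) : Decidable (Spec_get_ports_py hosts out) := by unfold Spec_get_ports_py; infer_instance

-- ===== CLAIM (what is proved, stated in full; the proofs are below) =====
def Claim_equal_get_ports_py : Prop := ∀ (hosts : List (String × List Int)), Dom_get_ports_py hosts → Spec_get_ports_py hosts (get_ports_py hosts)

-- ===== LEMMAS AND PROOFS =====

-- A's inner loop: appending the unseen elements of l keeps the accumulator Nodup and
-- makes its members exactly acc ∪ l.
theorem aLoop_inv (l : List Int) : ∀ (acc : List Int), acc.Nodup →
    (l.foldl (fun r port => if port ∈ r then r else r ++ [port]) acc).Nodup ∧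
    (∀ x, x ∈ l.foldl (fun r port => if port ∈ r then r else r ++ [port]) acc ↔ x ∈ acc ∨ x ∈ l) := by
  induction l with
  | nil => intro acc h; simpa using h
  | cons p t ih =>
    intro acc h
    simp only [List.foldl_cons]
    by_cases hp : p ∈ acc
    · simp only [if_pos hp]
      obtain ⟨h1, h2⟩ := ih acc h
      refine ⟨h1, fun x => ?_⟩
      rw [h2]
      constructor
      · rintro (hx | hx)
        · exact Or.inl hx
        · exact Or.inr (List.mem_cons_of_mem _ hx)
      · rintro (hx | hx)
        · exact Or.inl hx
        · rcases List.mem_cons.mp hx with rfl | hx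
          · exact Or.inl hp
          · exact Or.inr hx
    · simp only [if_neg hp]
      have hnd : (acc ++ [p]).Nodup := by
        simp [List.nodup_append, h]
        intro a ha rfl
        exact hp ha
      obtain ⟨h1, h2⟩ := ih (acc ++ [p]) hnd
      refine ⟨h1, fun x => ?_⟩
      rw [h2]
      simp [or_assoc]

-- A's outer loop over hosts.
theorem aOuter_inv (hosts : List (String × List Int)) : ∀ (acc : List Int), acc.Nodup →
    (hosts.foldl (fun r kv => kv.2.foldl (fun r port => if port ∈ r then r else r ++ [port]) r) acc).Nodup ∧
    (∀ x, x ∈ hosts.foldl (fun r kv => kv.2.foldl (fun r port => if port ∈ r then r else r ++ [port]) r) acc ↔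
      x ∈ acc ∨ x ∈ hosts.flatMap (·.2)) := by
  induction hosts with
  | nil => intro acc h; simpa using h
  | cons kv t ih =>
    intro acc h
    simp only [List.foldl_cons]
    obtain ⟨h1, h2⟩ := aLoop_inv kv.2 acc h
    obtain ⟨g1, g2⟩ := ih _ h1
    refine ⟨g1, fun x => ?_⟩
    rw [g2, h2]
    simp [or_assoc]

-- In a strictly increasing list every element is at most the last one.
theorem pairwise_lt_le_getLast : ∀ (l : List Int) (m : Int), l.Pairwise (· < ·) →
    l.getLast? = some m → ∀ a ∈ l, a ≤ m := by
  intro l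
  induction l with
  | nil => simp
  | cons x t ih =>
    intro m hp hl a ha
    cases t with
    | nil => simp_all
    | cons y s =>
      rw [List.getLast?_cons_cons] at hl
      rcases List.mem_cons.mp ha with rfl | ha
      · have hm : m ∈ y :: s := List.mem_of_getLast? hl
        exact le_of_lt ((List.pairwise_cons.mp hp).1 m hm)
      · exact ih m (List.pairwise_cons.mp hp).2 hl a ha

-- B's dedup pass: starting from a strictly increasing accumulator whose elements are
-- all ≤ the (weakly sorted) remaining input, the result is strictly increasing with
-- members exactly acc ∪ l.
theorem bLoop_inv (l : List Int) : ∀ (acc : List Int), acc.Pairwise (· < ·) →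
    l.Pairwise (· ≤ ·) → (∀ a ∈ acc, ∀ b ∈ l, a ≤ b) →
    (l.foldl (fun r port => if r = [] ∨ r.getLast? ≠ some port then r ++ [port] else r) acc).Pairwise (· < ·) ∧
    (∀ x, x ∈ l.foldl (fun r port => if r = [] ∨ r.getLast? ≠ some port then r ++ [port] else r) acc ↔ x ∈ acc ∨ x ∈ l) := by
  induction l with
  | nil => intro acc h _ _; simpa using h
  | cons p t ih =>
    intro acc hacc hl hle
    have hl' : t.Pairwise (· ≤ ·) := (List.pairwise_cons.mp hl).2
    have hpt : ∀ b ∈ t, p ≤ b := (List.pairwise_cons.mp hl).1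
    simp only [List.foldl_cons]
    by_cases hc : acc = [] ∨ acc.getLast? ≠ some p
    · simp only [if_pos hc]
      have hlt : ∀ a ∈ acc, a < p := by
        intro a ha
        rcases hc with hc | hc
        · simp [hc] at ha
        · have hne : acc ≠ [] := by rintro rfl; simp at ha
          obtain ⟨m, hm⟩ := List.getLast?_isSome.mpr hne |> Option.isSome_iff_exists.mp
          have ham : a ≤ m := pairwise_lt_le_getLast acc m hacc hm a ha
          have hmp : m ≤ p := hle m (List.mem_of_getLast? hm) p (List.mem_cons_self)
          have : m ≠ p := by rintro rfl; exact hc hm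
          omega
      have hacc' : (acc ++ [p]).Pairwise (· < ·) := by
        rw [List.pairwise_append]
        refine ⟨hacc, by simp, by simpa using hlt⟩
      have hle' : ∀ a ∈ acc ++ [p], ∀ b ∈ t, a ≤ b := by
        intro a ha b hb
        rcases List.mem_append.mp ha with ha | ha
        · exact hle a ha b (List.mem_cons_of_mem _ hb)
        · simp at ha; subst ha; exact hpt b hb
      obtain ⟨g1, g2⟩ := ih (acc ++ [p]) hacc' hl' hle'
      refine ⟨g1, fun x => ?_⟩
      rw [g2]; simp [or_assoc]
    · simp only [if_neg hc]
      rw [not_or, not_not] at hc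
      have hp : p ∈ acc := by
        have := List.mem_of_getLast? hc.2
        exact this
      have hle' : ∀ a ∈ acc, ∀ b ∈ t, a ≤ b := fun a ha b hb =>
        hle a ha b (List.mem_cons_of_mem _ hb)
      obtain ⟨g1, g2⟩ := ih acc hacc hl' hle'
      refine ⟨g1, fun x => ?_⟩
      rw [g2]
      constructor
      · rintro (hx | hx)
        · exact Or.inl hx
        · exact Or.inr (List.mem_cons_of_mem _ hx)
      · rintro (hx | hx)
        · exact Or.inl hx
        · rcases List.mem_cons.mp hx with rfl | hx
          · exact Or.inl hp
          · exact Or.inr hx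

-- ===== VERDICT (by name: the statement is the Claim_ definition above) =====
theorem get_ports_py_spec : Claim_equal_get_ports_py := by
  intro hosts _
  unfold Spec_get_ports_py get_ports_py get_ports_py_alt
  simp only []
  -- names
  set R := hosts.foldl (fun r kv => kv.2.foldl (fun r port => if port ∈ r then r else r ++ [port]) r) [] with hR
  have hflat : hosts.foldl (fun flat kv => flat ++ kv.2) [] = hosts.flatMap (·.2) := by
    simpa using PySem.List.foldl_append_eq_flatMap (l := hosts) (g := (·.2)) (acc := [])
  rw [hflat]
  set S := PySem.List.sorted (hosts.flatMap (·.2)) (fun x => x) false with hS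
  set B := S.foldl (fun r port => if r = [] ∨ r.getLast? ≠ some port then r ++ [port] else r) [] with hB
  obtain ⟨hRnd, hRmem⟩ := aOuter_inv hosts [] List.nodup_nil
  have hSsorted : S.Pairwise (· ≤ ·) := by
    simpa using PySem.List.sorted_pairwise (xs := hosts.flatMap (·.2)) (key := fun x => x)
  obtain ⟨hBlt, hBmem⟩ := bLoop_inv S [] List.Pairwise.nil hSsorted (by simp)
  have hBnd : B.Nodup := hBlt.imp ne_of_lt
  have hmemBR : ∀ x, x ∈ B ↔ x ∈ R := by
    intro x
    rw [hBmem, hRmem]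
    simp [hS, PySem.List.mem_sorted]
  have hperm : B.Perm R := (List.perm_ext_iff_of_nodup hBnd hRnd).mpr hmemBR
  exact PySem.List.sorted_eq_of_perm_of_pairwise_lt R B (fun x => x) hperm (by simpa using hBlt)
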